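-- pv_equiv track=rewrite | github.com/todayis-sunny/Algorithm | 프로그래머스/2/468372. 리프 노드 수 최대화/리프 노드 수 최대화.py | solution
-- ===== SOURCE A (Python) =====
-- def solution(dist_limit, split_limit):
--     max_leaf = 1
--
--     i = 0
--     power2 = 1
--     # 1. 가능한 2분배 층수(i)를 모두 탐색 (2^i <= split_limit)
--     while power2 <= split_limit:
--
--         # 2. 고정된 i에 대해, 허용되는 최대 3분배 층수(j)를 계산
--         # (명제에 따라 j는 무조건 최대치로 꽉 채우는 것이 이득임)
--         max_3_pow = split_limit // power2
--         j = 0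
--         power3 = 1
--         while power3 * 3 <= max_3_pow:
--             j += 1
--             power3 *= 3
--
--         # 3. 결정된 (i, j) 층수를 바탕으로 예산 차감 시뮬레이션
--         budget = dist_limit  # 남은 예산(분배 가능 횟수)
--         frontier = 1         # 현재 층의 노드 수 (루트 1개로 시작)
--         current_leaf = 1     # 현재까지의 리프 노드 수
--
--         # [2분할 구간 시뮬레이션]
--         for _ in range(i):
--             if budget == 0: break
--
--             # 현재 층의 노드 전부(frontier)와 남은 예산(budget) 중 작은 만큼만 분배 가능
--             splits = min(budget, frontier)
--             budget -= splits
--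
--             # 2분할을 1회 할 때마다 노드가 2개로 갈라지므로 리프는 1개(2-1) 증가
--             current_leaf += splits * 1
--
--             # 분배된 노드들은 다음 층의 프런티어가 됨
--             # (분배 안 된 노드는 리프로 남고 프런티어에서 제외됨)
--             frontier = splits * 2
--
--         # [3분할 구간 시뮬레이션]
--         if budget > 0:
--             for _ in range(j):
--                 if budget == 0: break
--
--                 splits = min(budget, frontier)
--                 budget -= splits
--
--                 # 3분할을 1회 할 때마다 노드가 3개로 갈라지므로 리프는 2개(3-1) 증가
--                 current_leaf += splits * 2
--
--                 frontier = splits * 3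
--
--         # 4. 최대 리프 수 갱신
--         max_leaf = max(max_leaf, current_leaf)
--
--         # 다음 i 탐색을 위해 2를 곱해줌
--         i += 1
--         power2 *= 2
--
--     return max_leaf
-- ===== SOURCE B (Python) =====
-- def _phase(d, f, leaf, b, L):
--     # Closed form for L layers of b-way splitting from frontier f with budget d:
--     # count full layers m via the geometric cumulative cost, then one partial layer.
--     m = 0
--     while m < L and f * (b ** (m + 1) - 1) // (b - 1) <= d:
--         m += 1
--     d -= f * (b ** m - 1) // (b - 1)
--     leaf += f * (b ** m - 1)
--     f *= b ** m
--     if m < L and d != 0: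
--         leaf += d * (b - 1)
--         f, d = d * b, 0
--     return d, f, leaf
--
--
-- def solution(dist_limit, split_limit):
--     best = 1
--     i, p2 = 0, 1
--     while p2 <= split_limit:
--         cap = split_limit // p2
--         j = 0
--         while 3 ** (j + 1) <= cap:
--             j += 1
--         d, f, leaf = _phase(dist_limit, 1, 1, 2, i)
--         if d > 0:
--             d, f, leaf = _phase(d, f, leaf, 3, j)
--         best = max(best, leaf)
--         i += 1
--         p2 *= 2
--     return best
-- ===== Notes on version B (the rewrite author's own statement) =====
-- stated objective: alternative
-- what changed: Each per-layer budget simulation loop (one iteration per tree layer, updating splits/budget/leaf/frontier) is replaced by a closed-form phase: count the full layers via the geometric cumulative cost f*(b^m-1)/(b-1), add the geometric leaf contribution at once, then handle the single partial layer.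
import Mathlib
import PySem

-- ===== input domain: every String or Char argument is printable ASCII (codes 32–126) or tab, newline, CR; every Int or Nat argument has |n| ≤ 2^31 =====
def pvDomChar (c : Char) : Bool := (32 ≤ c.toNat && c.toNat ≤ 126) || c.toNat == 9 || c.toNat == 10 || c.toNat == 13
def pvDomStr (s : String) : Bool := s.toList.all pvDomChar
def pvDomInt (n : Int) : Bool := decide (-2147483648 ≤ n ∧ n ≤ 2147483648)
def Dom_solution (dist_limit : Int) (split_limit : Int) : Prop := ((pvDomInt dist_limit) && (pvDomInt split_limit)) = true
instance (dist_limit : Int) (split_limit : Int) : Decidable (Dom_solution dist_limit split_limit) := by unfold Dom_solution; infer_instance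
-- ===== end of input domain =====

-- B replaces each per-layer budget simulation loop by a closed-form phase (geometric
-- cumulative cost for the full layers, then one partial layer); same asymptotic cost.


-- ===== PORT A =====
-- inner while: j += 1; power3 *= 3  (the '0 < power3' conjunct is a totality guard only;
-- the call site always has power3 = 1)
def jLoopA (mx : Int) (j : Nat) (power3 : Int) : Nat :=
  if h : power3 * 3 ≤ mx ∧ 0 < power3 then jLoopA mx (j + 1) (power3 * 3) else j
  termination_by (mx + 1 - power3).toNat
  decreasing_by omega

-- [2-split simulation] for _ in range(i)
def sim2A : Int → Int → Int → Nat → Int × Int × Int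
  | budget, frontier, leaf, 0 => (budget, frontier, leaf)
  | budget, frontier, leaf, Nat.succ n =>
    if budget = 0 then (budget, frontier, leaf)
    else
      let s := min budget frontier
      sim2A (budget - s) (s * 2) (leaf + s * 1) n

-- [3-split simulation] for _ in range(j)
def sim3A : Int → Int → Int → Nat → Int × Int × Int
  | budget, frontier, leaf, 0 => (budget, frontier, leaf)
  | budget, frontier, leaf, Nat.succ n =>
    if budget = 0 then (budget, frontier, leaf)
    else
      let s := min budget frontier
      sim3A (budget - s) (s * 3) (leaf + s * 2) n

-- outer while over power2 = 2^i ('0 < power2' is a totality guard; the call site has power2 = 1)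
def outerA (dist split maxLeaf : Int) (i : Nat) (power2 : Int) : Int :=
  if h : power2 ≤ split ∧ 0 < power2 then
    let mx := PySem.Int.floordiv split power2
    let j := jLoopA mx 0 1
    let st := sim2A dist 1 1 i
    let st2 := if st.1 > 0 then sim3A st.1 st.2.1 st.2.2 j else st
    outerA dist split (max maxLeaf st2.2.2) (i + 1) (power2 * 2)
  else maxLeaf
  termination_by (split + 1 - power2).toNat
  decreasing_by omega

def solution (dist_limit : Int) (split_limit : Int) : Int :=
  outerA dist_limit split_limit 1 0 1

-- ===== PORT B =====
-- while m < L and f * (b ** (m + 1) - 1) // (b - 1) <= d: m += 1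
def mloopB (L : Nat) (d f b : Int) (m : Nat) : Nat :=
  if h : m < L ∧ PySem.Int.floordiv (f * (b ^ (m + 1) - 1)) (b - 1) ≤ d then
    mloopB L d f b (m + 1)
  else m
  termination_by L - m
  decreasing_by omega

-- def _phase(d, f, leaf, b, L)
def phaseB (d f leaf b : Int) (L : Nat) : Int × Int × Int :=
  let m := mloopB L d f b 0
  let d' := d - PySem.Int.floordiv (f * (b ^ m - 1)) (b - 1)
  let leaf' := leaf + f * (b ^ m - 1)
  let f' := f * b ^ m
  if m < L ∧ d' ≠ 0 then (0, d' * b, leaf' + d' * (b - 1)) else (d', f', leaf')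

-- while 3 ** (j + 1) <= cap: j += 1
def jCountB (cap : Int) (j : Nat) : Nat :=
  if h : (3 : Int) ^ (j + 1) ≤ cap then jCountB cap (j + 1) else j
  termination_by (cap + 1 - 3 ^ j).toNat
  decreasing_by
    have h1 : (1 : Int) ≤ 3 ^ j := one_le_pow₀ (by norm_num)
    have h2 : (3 : Int) ^ (j + 1) = 3 * 3 ^ j := by rw [pow_succ]; ring
    omega

-- outer while over p2 ('0 < p2' is a totality guard; the call site has p2 = 1)
def outerB (dist split best : Int) (i : Nat) (p2 : Int) : Int :=
  if h : p2 ≤ split ∧ 0 < p2 then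
    let cap := PySem.Int.floordiv split p2
    let j := jCountB cap 0
    let st := phaseB dist 1 1 2 i
    let st2 := if st.1 > 0 then phaseB st.1 st.2.1 st.2.2 3 j else st
    outerB dist split (max best st2.2.2) (i + 1) (p2 * 2)
  else best
  termination_by (split + 1 - p2).toNat
  decreasing_by omega

def solution_alt (dist_limit : Int) (split_limit : Int) : Int :=
  outerB dist_limit split_limit 1 0 1

-- ===== PRECONDITION & SPEC =====
def Spec_solution (dist_limit : Int) (split_limit : Int) (out : Int) : Prop := out = solution_alt dist_limit split_limit
instance (dist_limit : Int) (split_limit : Int) (out : Int) : Decidable (Spec_solution dist_limit split_limit out) := by unfold Spec_solution; infer_instance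

-- ===== CLAIM (what is proved, stated in full; the proofs are below) =====
def Claim_equal_solution : Prop := ∀ (dist_limit : Int) (split_limit : Int), Dom_solution dist_limit split_limit → Spec_solution dist_limit split_limit (solution dist_limit split_limit)

-- ===== LEMMAS AND PROOFS =====

-- generic one-layer simulation with branch factor b (sim2A = simG 2, sim3A = simG 3)
def simG (b : Int) : Int → Int → Int → Nat → Int × Int × Int
  | budget, frontier, leaf, 0 => (budget, frontier, leaf)
  | budget, frontier, leaf, Nat.succ n =>
    if budget = 0 then (budget, frontier, leaf)
    else
      let s := min budget frontier
      simG b (budget - s) (s * b) (leaf + s * (b - 1)) n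

lemma sim2A_eq (d f l : Int) : ∀ L, sim2A d f l L = simG 2 d f l L := by
  intro L
  induction L generalizing d f l with
  | zero => rfl
  | succ n ih =>
    simp only [sim2A, simG]
    split_ifs with h
    · rfl
    · rw [ih]; norm_num

lemma sim3A_eq (d f l : Int) : ∀ L, sim3A d f l L = simG 3 d f l L := by
  intro L
  induction L generalizing d f l with
  | zero => rfl
  | succ n ih =>
    simp only [sim3A, simG]
    split_ifs with h
    · rfl
    · rw [ih]; norm_num

lemma simG_zero (b f l : Int) (L : Nat) : simG b 0 f l L = (0, f, l) := by
  cases L <;> simp [simG]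

-- geometric sum 1 + b + … + b^(m-1), unfolded at the front
def Sg (b : Int) : Nat → Int
  | 0 => 0
  | Nat.succ m => 1 + b * Sg b m

lemma Sg_mul (b : Int) : ∀ m, Sg b m * (b - 1) = b ^ m - 1 := by
  intro m
  induction m with
  | zero => simp [Sg]
  | succ m ih =>
    simp only [Sg, pow_succ]
    have h : (1 + b * Sg b m) * (b - 1) = (b - 1) + b * (Sg b m * (b - 1)) := by ring
    rw [h, ih]; ring

lemma fd_eq {b : Int} (hb : 2 ≤ b) (f : Int) (m : Nat) :
    PySem.Int.floordiv (f * (b ^ m - 1)) (b - 1) = f * Sg b m := by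
  rw [← Sg_mul b m, show f * (Sg b m * (b - 1)) = f * Sg b m * (b - 1) by ring,
    PySem.Int.floordiv_eq_ediv_of_pos (by omega)]
  exact Int.mul_ediv_cancel _ (by omega)

lemma mloopB_shift {b : Int} (hb : 2 ≤ b) (d f : Int) :
    ∀ (k L m : Nat), L ≤ m + k →
      mloopB (L + 1) d f b (m + 1) = mloopB L (d - f) (f * b) b m + 1 := by
  intro k
  induction k with
  | zero =>
    intro L m h
    conv_lhs => rw [mloopB]
    conv_rhs => rw [mloopB]
    have h1 : ¬ (m + 1 < L + 1) := by omega
    have h2 : ¬ (m < L) := by omega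
    simp [h1, h2]
  | succ k ih =>
    intro L m h
    conv_lhs => rw [mloopB]
    conv_rhs => rw [mloopB]
    have hS : f * Sg b (m + 2) = f + f * b * Sg b (m + 1) := by simp [Sg]; ring
    rw [fd_eq hb f (m + 2), fd_eq hb (f * b) (m + 1)]
    by_cases hm : m < L
    · have hiff : (f * Sg b (m + 2) ≤ d) ↔ (f * b * Sg b (m + 1) ≤ d - f) := by omega
      by_cases hc : f * b * Sg b (m + 1) ≤ d - f
      · have hc' : f * Sg b (m + 2) ≤ d := hiff.mpr hc
        rw [dif_pos ⟨by omega, hc'⟩, dif_pos ⟨hm, hc⟩]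
        exact ih L (m + 1) (by omega)
      · have hc' : ¬ f * Sg b (m + 2) ≤ d := fun hx => hc (hiff.mp hx)
        rw [dif_neg (by tauto), dif_neg (by tauto)]
    · rw [dif_neg (by omega), dif_neg (by tauto)]

lemma mloopB_start_stop {b : Int} (hb : 2 ≤ b) (d f : Int) (L : Nat) (h : ¬ f ≤ d) :
    mloopB (L + 1) d f b 0 = 0 := by
  rw [mloopB]
  have : f * Sg b 1 = f := by simp [Sg]
  rw [fd_eq hb f 1, this]
  simp [h]

lemma phaseB_nil {b : Int} (hb : 2 ≤ b) (d f leaf : Int) (L : Nat)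
    (hm : mloopB L d f b 0 = 0) (hd : ¬ (0 < L ∧ d ≠ 0)) :
    phaseB d f leaf b L = (d, f, leaf) := by
  simp only [phaseB, hm]
  have h0 : f * Sg b 0 = 0 := by simp [Sg]
  rw [fd_eq hb f 0, h0]
  simp only [sub_zero, pow_zero, mul_one]
  rw [if_neg hd]
  simp

lemma phaseB_step {b : Int} (hb : 2 ≤ b) (d f leaf : Int) (L : Nat) (hfd : f ≤ d) :
    phaseB d f leaf b (L + 1) = phaseB (d - f) (f * b) (leaf + f * (b - 1)) b L := by
  have hm : mloopB (L + 1) d f b 0 = mloopB L (d - f) (f * b) b 0 + 1 := by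
    rw [mloopB]
    have h1 : f * Sg b 1 = f := by simp [Sg]
    rw [fd_eq hb f 1, h1, dif_pos ⟨by omega, hfd⟩]
    exact mloopB_shift hb d f L L 0 (by omega)
  set M := mloopB L (d - f) (f * b) b 0 with hM
  simp only [phaseB, hm, ← hM]
  rw [fd_eq hb f (M + 1), fd_eq hb (f * b) M]
  have hd : d - f * Sg b (M + 1) = d - f - f * b * Sg b M := by simp [Sg]; ring
  have hl : leaf + f * (b ^ (M + 1) - 1) = leaf + f * (b - 1) + f * b * (b ^ M - 1) := by
    rw [pow_succ]; ring
  have hf : f * b ^ (M + 1) = f * b * b ^ M := by rw [pow_succ]; ring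
  rw [hd, hl, hf]
  have hc : (M + 1 < L + 1) ↔ (M < L) := by omega
  by_cases h : M < L ∧ d - f - f * b * Sg b M ≠ 0
  · rw [if_pos ⟨hc.mpr h.1, h.2⟩, if_pos h]
  · rw [if_neg (by tauto), if_neg h]

lemma simG_eq_phaseB {b : Int} (hb : 2 ≤ b) :
    ∀ (L : Nat) (d f leaf : Int), 1 ≤ f → simG b d f leaf L = phaseB d f leaf b L := by
  intro L
  induction L with
  | zero =>
    intro d f leaf hf
    have hm : mloopB 0 d f b 0 = 0 := by rw [mloopB]; exact dif_neg (by simp)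
    rw [phaseB_nil hb d f leaf 0 hm (by omega)]
    rfl
  | succ n ih =>
    intro d f leaf hf
    simp only [simG]
    by_cases hd : d = 0
    · subst hd
      rw [if_pos rfl]
      have hm : mloopB (n + 1) 0 f b 0 = 0 := mloopB_start_stop hb 0 f n (by omega)
      rw [phaseB_nil hb 0 f leaf (n + 1) hm (by simp)]
    · rw [if_neg hd]
      by_cases hfd : f ≤ d
      · have hmin : min d f = f := min_eq_right hfd
        rw [hmin, phaseB_step hb d f leaf n hfd]
        exact ih (d - f) (f * b) (leaf + f * (b - 1)) (by nlinarith)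
      · have hmin : min d f = d := min_eq_left (by omega)
        rw [hmin, sub_self, simG_zero]
        have hm : mloopB (n + 1) d f b 0 = 0 := mloopB_start_stop hb d f n hfd
        simp only [phaseB, hm]
        have h0 : f * Sg b 0 = 0 := by simp [Sg]
        rw [fd_eq hb f 0, h0]
        simp only [sub_zero, pow_zero, mul_one]
        rw [if_pos ⟨by omega, hd⟩]
        norm_num

lemma simG_front {b : Int} (hb : 2 ≤ b) :
    ∀ (L : Nat) (d f leaf : Int), 1 ≤ f → 0 < (simG b d f leaf L).1 →
      1 ≤ (simG b d f leaf L).2.1 := by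
  intro L
  induction L with
  | zero => intro d f leaf hf _; exact hf
  | succ n ih =>
    intro d f leaf hf hpos
    simp only [simG] at hpos ⊢
    by_cases hd : d = 0
    · rw [if_pos hd] at *; exact hf
    · rw [if_neg hd] at hpos ⊢
      by_cases hfd : f ≤ d
      · rw [min_eq_right hfd] at hpos ⊢
        exact ih (d - f) (f * b) (leaf + f * (b - 1)) (by nlinarith) hpos
      · rw [min_eq_left (by omega), sub_self, simG_zero] at hpos
        exact absurd hpos (by norm_num)

lemma jLoopA_eq (mx : Int) : ∀ (k j : Nat), (mx + 1 - 3 ^ j).toNat ≤ k →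
    jLoopA mx j (3 ^ j) = jCountB mx j := by
  intro k
  induction k with
  | zero =>
    intro j h
    have h1 : (1 : Int) ≤ 3 ^ j := one_le_pow₀ (by norm_num)
    have h2 : (3 : Int) ^ (j + 1) = 3 ^ j * 3 := by rw [pow_succ]
    rw [jLoopA, jCountB]
    rw [dif_neg (by omega), dif_neg (by omega)]
  | succ k ih =>
    intro j h
    have h1 : (1 : Int) ≤ 3 ^ j := one_le_pow₀ (by norm_num)
    have h2 : (3 : Int) ^ (j + 1) = 3 ^ j * 3 := by rw [pow_succ]
    rw [jLoopA, jCountB]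
    by_cases hc : (3 : Int) ^ j * 3 ≤ mx
    · rw [dif_pos ⟨hc, by omega⟩, dif_pos (show (3 : Int) ^ (j + 1) ≤ mx by omega), ← h2]
      exact ih (j + 1) (by omega)
    · rw [dif_neg (by tauto), dif_neg (by omega)]

lemma outer_eq (d s : Int) : ∀ (k : Nat) (ml : Int) (i : Nat) (p : Int),
    (s + 1 - p).toNat ≤ k → 0 < p → outerA d s ml i p = outerB d s ml i p := by
  intro k
  induction k with
  | zero =>
    intro ml i p h hp
    rw [outerA, outerB]
    rw [dif_neg (by omega), dif_neg (by omega)]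
  | succ k ih =>
    intro ml i p h hp
    rw [outerA, outerB]
    by_cases hps : p ≤ s
    · rw [dif_pos ⟨hps, hp⟩, dif_pos ⟨hps, hp⟩]
      have hj : jLoopA (PySem.Int.floordiv s p) 0 1 =
          jCountB (PySem.Int.floordiv s p) 0 := by
        have := jLoopA_eq (PySem.Int.floordiv s p)
          (PySem.Int.floordiv s p + 1 - 3 ^ 0).toNat 0 (le_refl _)
        simpa using this
      have h2 : sim2A d 1 1 i = phaseB d 1 1 2 i := by
        rw [sim2A_eq, simG_eq_phaseB (by norm_num) i d 1 1 (by norm_num)]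
      have h3 : ∀ st : Int × Int × Int, st = sim2A d 1 1 i →
          (if st.1 > 0 then sim3A st.1 st.2.1 st.2.2 (jLoopA (PySem.Int.floordiv s p) 0 1)
            else st) =
          (if (phaseB d 1 1 2 i).1 > 0 then
            phaseB (phaseB d 1 1 2 i).1 (phaseB d 1 1 2 i).2.1 (phaseB d 1 1 2 i).2.2 3
              (jCountB (PySem.Int.floordiv s p) 0)
          else phaseB d 1 1 2 i) := by
        intro st hst
        rw [hst, h2]
        by_cases hb1 : (phaseB d 1 1 2 i).1 > 0
        · rw [if_pos hb1, if_pos hb1, hj, sim3A_eq]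
          have hfr : 1 ≤ (phaseB d 1 1 2 i).2.1 := by
            rw [← simG_eq_phaseB (by norm_num) i d 1 1 (by norm_num)] at hb1 ⊢
            exact simG_front (by norm_num) i d 1 1 (by norm_num) hb1
          exact simG_eq_phaseB (by norm_num) _ _ _ _ hfr
        · rw [if_neg hb1, if_neg hb1]
      simp only
      rw [h3 _ rfl]
      exact ih _ (i + 1) (p * 2) (by omega) (by omega)
    · rw [dif_neg (by tauto), dif_neg (by tauto)]

-- ===== VERDICT (by name: the statement is the Claim_ definition above) =====
theorem solution_spec : Claim_equal_solution := by
  intro d s _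
  unfold Spec_solution solution solution_alt
  exact outer_eq d s (s + 1 - 1).toNat 1 0 1 (by omega) (by norm_num)
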